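-- pv_equiv track=rewrite | github.com/evanraalte/aoc | solutions/2025/06.py | parse_operators
-- ===== SOURCE A (Python) =====
-- def parse_operators(operators_row: str):
--     operators = []
--     for idx, c in enumerate(operators_row):
--         if c in "*+":
--             operators.append((c,idx))
--     operators_new = []
--     for idx in range(len(operators)):
--         o, _min = operators[idx]
--         _max = operators[idx+1][1] if idx < (len(operators) -1)  else len(operators_row)
--         operators_new.append((o ,_min, _max))
--     return operators_new
-- ===== SOURCE B (Python) =====
-- def parse_operators(operators_row: str):
--     result = []
--     pending = None  # (char, start index) of the operator awaiting its end
--     for idx, c in enumerate(operators_row):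
--         if c in "*+":
--             if pending is not None:
--                 result.append((pending[0], pending[1], idx))
--             pending = (c, idx)
--     if pending is not None:
--         result.append((pending[0], pending[1], len(operators_row)))
--     return result
-- ===== Notes on version B (the rewrite author's own statement) =====
-- stated objective: simpler
-- what changed: A first collects all operator positions into a list and then runs a second index-driven loop pairing operators[idx] with operators[idx+1]; B is a single streaming pass that keeps only the pending operator (char, start) and emits each (char, start, end) triple as soon as the next operator (or the end of the row) is seen, so the intermediate position list and all indexing disappear.
import Mathlib
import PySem

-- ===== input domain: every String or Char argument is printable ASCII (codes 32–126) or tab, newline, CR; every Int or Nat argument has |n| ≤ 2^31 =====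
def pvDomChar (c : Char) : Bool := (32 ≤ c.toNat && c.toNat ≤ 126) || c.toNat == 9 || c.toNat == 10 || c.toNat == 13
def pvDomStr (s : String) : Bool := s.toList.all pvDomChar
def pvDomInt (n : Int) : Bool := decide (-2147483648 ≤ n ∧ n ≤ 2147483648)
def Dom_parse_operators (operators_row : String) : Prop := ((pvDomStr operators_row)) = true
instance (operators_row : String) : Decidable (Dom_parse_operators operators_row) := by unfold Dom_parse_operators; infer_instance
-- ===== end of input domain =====

-- B replaces A's two passes (collect operator positions, then pair consecutive positions by index)
-- with one streaming pass that keeps the pending operator; objective: simpler (single pass, no indexing).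

-- ===== PORT A =====
-- 'c in "*+"' for a single char c is ported as the equality test c == '*' || c == '+' (exact).
def parse_operators (operators_row : String) : List (String × Int × Int) :=
  let operators : List (String × Int) :=
    (PySem.List.enumerate operators_row.toList).foldl
      (fun acc p => if p.2 == '*' || p.2 == '+' then acc ++ [(String.singleton p.2, p.1)] else acc) []
  -- second loop: for idx in range(len(operators)); indices are always in range, default never read
  (PySem.List.pyRange 0 (operators.length : Int) 1).foldl
    (fun acc idx =>
      acc ++ [((PySem.List.pyGetD operators idx ("", 0)).1,
               (PySem.List.pyGetD operators idx ("", 0)).2,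
               if idx < (operators.length : Int) - 1 then
                 (PySem.List.pyGetD operators (idx + 1) ("", 0)).2
               else (PySem.Str.len operators_row : Int))]) []

-- ===== PORT B =====
def parse_operators_alt (operators_row : String) : List (String × Int × Int) :=
  let st :=
    (PySem.List.enumerate operators_row.toList).foldl
      (fun (st : List (String × Int × Int) × Option (String × Int)) p =>
        if p.2 == '*' || p.2 == '+' then
          (match st.2 with
           | some pd => st.1 ++ [(pd.1, pd.2, p.1)]
           | none => st.1,
           some (String.singleton p.2, p.1))
        else st)
      ([], none)
  match st.2 with
  | some pd => st.1 ++ [(pd.1, pd.2, (PySem.Str.len operators_row : Int))]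
  | none => st.1

-- ===== PRECONDITION & SPEC =====
def Spec_parse_operators (operators_row : String) (out : List (String × Int × Int)) : Prop := out = parse_operators_alt operators_row
instance (operators_row : String) (out : List (String × Int × Int)) : Decidable (Spec_parse_operators operators_row out) := by unfold Spec_parse_operators; infer_instance

-- ===== CLAIM (what is proved, stated in full; the proofs are below) =====
def Claim_equal_parse_operators : Prop := ∀ (operators_row : String), Dom_parse_operators operators_row → Spec_parse_operators operators_row (parse_operators operators_row)

-- ===== LEMMAS AND PROOFS =====

/-- Pair the collected operators `(char, start)` into `(char, start, end)` triples,
carrying the pending operator; `n` closes the last one. -/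
def pvFinish (pend : Option (String × Int)) (L : List (String × Int)) (n : Int) :
    List (String × Int × Int) :=
  match pend, L with
  | none, [] => []
  | none, a :: t => pvFinish (some a) t n
  | some p, [] => [(p.1, p.2, n)]
  | some p, a :: t => (p.1, p.2, a.2) :: pvFinish (some a) t n

/-- A's index-pairing pass computes `pvFinish none`. -/
lemma range_map_eq_finish (L : List (String × Int)) (n : Int) :
    (List.range L.length).map (fun (k : Nat) =>
      ((PySem.List.pyGetD L (k : Int) ("", 0)).1,
       (PySem.List.pyGetD L (k : Int) ("", 0)).2,
       if (k : Int) < (L.length : Int) - 1 then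
         (PySem.List.pyGetD L ((k : Int) + 1) ("", 0)).2
       else n))
    = pvFinish none L n := by
  induction L with
  | nil => simp [pvFinish]
  | cons a t ih =>
    cases t with
    | nil => simp [pvFinish, PySem.List.pyGetD]
    | cons b t' =>
      rw [List.length_cons, List.range_succ_eq_map, List.map_cons, List.map_map]
      have htl :
          (List.range (b :: t').length).map
            ((fun (k : Nat) =>
              ((PySem.List.pyGetD (a :: b :: t') (k : Int) ("", 0)).1,
               (PySem.List.pyGetD (a :: b :: t') (k : Int) ("", 0)).2,
               if (k : Int) < (((b :: t').length + 1 : Nat) : Int) - 1 then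
                 (PySem.List.pyGetD (a :: b :: t') ((k : Int) + 1) ("", 0)).2
               else n)) ∘ Nat.succ)
          = pvFinish none (b :: t') n := by
        rw [← ih]
        refine List.map_congr_left (fun k hk => ?_)
        simp only [Function.comp, Nat.succ_eq_add_one]
        have hc : ((k + 1 + 1 : Nat) : Int) = ((k + 1 : Nat) : Int) + 1 := by push_cast; ring
        have hc0 : ((k + 1 : Nat) : Int) = (k : Int) + 1 := by push_cast; ring
        rw [← hc, ← hc0]
        simp only [PySem.List.pyGetD_natCast]
        have h1 : (a :: b :: t').getD (k + 1) ("", 0) = (b :: t').getD k ("", 0) := rfl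
        have h2 : (a :: b :: t').getD (k + 1 + 1) ("", 0) = (b :: t').getD (k + 1) ("", 0) := rfl
        rw [h1, h2]
        split_ifs with hA hB <;> first | rfl | (exfalso; simp only [List.length_cons] at *; omega)
      rw [htl]
      have hhd : PySem.List.pyGetD (a :: b :: t') ((0 : Nat) : Int) ("", 0) = a := by simp
      have hif : (((0 : Nat) : Int)) < (((b :: t').length + 1 : Nat) : Int) - 1 := by
        simp only [List.length_cons]; push_cast; omega
      have hsnd : PySem.List.pyGetD (a :: b :: t') (((0 : Nat) : Int) + 1) ("", 0) = b := by
        have h01 : (((0 : Nat) : Int) + 1) = ((1 : Nat) : Int) := by norm_num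
        rw [h01, PySem.List.pyGetD_natCast]
        rfl
      simp only [pvFinish, hhd, if_pos hif, hsnd]

/-- B's streaming loop (plus its epilogue) computes `pvFinish` of the filtered operators. -/
lemma alt_loop_eq_finish (es : List (Int × Char)) (n : Int) :
    ∀ (res : List (String × Int × Int)) (pend : Option (String × Int)),
    (match (es.foldl
        (fun (st : List (String × Int × Int) × Option (String × Int)) p =>
          if p.2 == '*' || p.2 == '+' then
            (match st.2 with
             | some pd => st.1 ++ [(pd.1, pd.2, p.1)]
             | none => st.1,
             some (String.singleton p.2, p.1))
          else st)
        (res, pend)).2 with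
     | some pd => (es.foldl
        (fun (st : List (String × Int × Int) × Option (String × Int)) p =>
          if p.2 == '*' || p.2 == '+' then
            (match st.2 with
             | some pd => st.1 ++ [(pd.1, pd.2, p.1)]
             | none => st.1,
             some (String.singleton p.2, p.1))
          else st)
        (res, pend)).1 ++ [(pd.1, pd.2, n)]
     | none => (es.foldl
        (fun (st : List (String × Int × Int) × Option (String × Int)) p =>
          if p.2 == '*' || p.2 == '+' then
            (match st.2 with
             | some pd => st.1 ++ [(pd.1, pd.2, p.1)]
             | none => st.1,
             some (String.singleton p.2, p.1))
          else st)
        (res, pend)).1)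
    = res ++ pvFinish pend
        ((es.filter (fun p => p.2 == '*' || p.2 == '+')).map
          (fun p => (String.singleton p.2, p.1))) n := by
  induction es with
  | nil => intro res pend; cases pend <;> simp [pvFinish]
  | cons e t ih =>
    intro res pend
    by_cases hop : (e.2 == '*' || e.2 == '+') = true
    · cases pend with
      | none =>
        simp only [List.foldl_cons, List.filter_cons, hop, if_true, List.map_cons, pvFinish]
        exact ih res (some (String.singleton e.2, e.1))
      | some q =>
        simp only [List.foldl_cons, List.filter_cons, hop, if_true, List.map_cons, pvFinish]
        rw [ih (res ++ [(q.1, q.2, e.1)]) (some (String.singleton e.2, e.1))]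
        simp
    · simp only [List.foldl_cons, List.filter_cons, hop, Bool.false_eq_true]
      exact ih res pend

-- ===== VERDICT (by name: the statement is the Claim_ definition above) =====
theorem parse_operators_spec : Claim_equal_parse_operators := by
  intro s _
  unfold Spec_parse_operators parse_operators parse_operators_alt
  rw [PySem.List.foldl_append_if]
  set L := ((PySem.List.enumerate s.toList).filter (fun p => p.2 == '*' || p.2 == '+')).map
      (fun p => (String.singleton p.2, p.1)) with hL
  rw [alt_loop_eq_finish (PySem.List.enumerate s.toList) ((PySem.Str.len s : Int)) [] none]
  rw [PySem.List.foldl_append_singleton_eq_map, PySem.List.pyRange_one]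
  simp only [List.nil_append, Int.sub_zero, Int.toNat_natCast, List.map_map]
  rw [← range_map_eq_finish L ((PySem.Str.len s : Int))]
  refine List.map_congr_left (fun k hk => ?_)
  simp
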